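-- pv_equiv track=rewrite | github.com/Ashford-A/PRECEPTS1 | experiments/subvariant_infer/setup_infer.py | compare_lvls
-- ===== SOURCE A (Python) =====
-- def compare_lvls(lvls1, lvls2):
--     for i in range(1, len(lvls1)):
--         for j in range(1, len(lvls2) + 1):
--             if lvls1[i:] == lvls2[:j]:
--                 return False
--
--     for j in range(1, len(lvls2)):
--         for i in range(1, len(lvls1) + 1):
--             if lvls2[j:] == lvls1[:i]:
--                 return False
--
--     return True
-- ===== SOURCE B (Python) =====
-- def compare_lvls(lvls1, lvls2):
--     def hangs(xs, ys):
--         # some proper nonempty suffix of xs equals a prefix of ys: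
--         # only the overlap length k = len(suffix) can match, so scan k directly
--         n = len(xs)
--         return any(xs[n - k:] == ys[:k] for k in range(1, min(n, len(ys) + 1)))
--     return not (hangs(lvls1, lvls2) or hangs(lvls2, lvls1))
-- ===== Notes on version B (the rewrite author's own statement) =====
-- stated objective: faster
-- what changed: A scans all (suffix start, prefix length) pairs in nested loops in both directions; B notes that a match forces the prefix length to equal the suffix length, so it does a single loop over the possible overlap lengths k, comparing xs[n-k:] with ys[:k].
import Mathlib
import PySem

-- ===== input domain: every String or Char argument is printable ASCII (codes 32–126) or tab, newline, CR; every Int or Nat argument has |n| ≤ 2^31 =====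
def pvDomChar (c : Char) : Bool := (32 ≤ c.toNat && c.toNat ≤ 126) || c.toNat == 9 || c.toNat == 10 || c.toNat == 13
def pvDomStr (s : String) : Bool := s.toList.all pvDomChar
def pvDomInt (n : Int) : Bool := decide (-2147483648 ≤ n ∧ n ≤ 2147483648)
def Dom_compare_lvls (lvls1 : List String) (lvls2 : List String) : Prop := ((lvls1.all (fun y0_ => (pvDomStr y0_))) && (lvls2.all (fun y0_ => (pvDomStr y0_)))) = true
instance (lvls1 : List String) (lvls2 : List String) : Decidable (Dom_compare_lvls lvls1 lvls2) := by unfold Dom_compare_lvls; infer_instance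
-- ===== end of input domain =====

-- B scans only the possible overlap lengths instead of A's nested loops over all (start, prefix-length) pairs.

-- ===== PORT A =====
-- A: two nested early-returning loops; ported as `any` over the same ranges, branches in order.
def compare_lvls (lvls1 : List String) (lvls2 : List String) : Bool :=
  if (PySem.List.pyRange 1 (lvls1.length : Int) 1).any (fun i =>
       (PySem.List.pyRange 1 ((lvls2.length : Int) + 1) 1).any (fun j =>
         PySem.List.slice lvls1 (some i) none == PySem.List.slice lvls2 none (some j)))
  then false
  else if (PySem.List.pyRange 1 (lvls2.length : Int) 1).any (fun j =>
       (PySem.List.pyRange 1 ((lvls1.length : Int) + 1) 1).any (fun i =>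
         PySem.List.slice lvls2 (some j) none == PySem.List.slice lvls1 none (some i)))
  then false
  else true

-- ===== PORT B =====
-- hangs xs ys: some proper nonempty suffix of xs equals a prefix of ys (single loop over the overlap length k)
def pvHangs (xs : List String) (ys : List String) : Bool :=
  (PySem.List.pyRange 1 (min (xs.length : Int) ((ys.length : Int) + 1)) 1).any (fun k =>
    PySem.List.slice xs (some ((xs.length : Int) - k)) none == PySem.List.slice ys none (some k))

def compare_lvls_alt (lvls1 : List String) (lvls2 : List String) : Bool :=
  !(pvHangs lvls1 lvls2 || pvHangs lvls2 lvls1)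

-- ===== PRECONDITION & SPEC =====
def Spec_compare_lvls (lvls1 : List String) (lvls2 : List String) (out : Bool) : Prop := out = compare_lvls_alt lvls1 lvls2
instance (lvls1 : List String) (lvls2 : List String) (out : Bool) : Decidable (Spec_compare_lvls lvls1 lvls2 out) := by unfold Spec_compare_lvls; infer_instance

-- ===== CLAIM (what is proved, stated in full; the proofs are below) =====
def Claim_equal_compare_lvls : Prop := ∀ (lvls1 : List String) (lvls2 : List String), Dom_compare_lvls lvls1 lvls2 → Spec_compare_lvls lvls1 lvls2 (compare_lvls lvls1 lvls2)

-- ===== LEMMAS AND PROOFS =====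

-- A's nested scan over (suffix start i, prefix length j) fires iff B's scan over the overlap length fires:
-- a match forces j = len xs - i, so the inner loop over j is redundant.
lemma loopA_eq_hangs (xs ys : List String) :
    ((PySem.List.pyRange 1 (xs.length : Int) 1).any (fun i =>
       (PySem.List.pyRange 1 ((ys.length : Int) + 1) 1).any (fun j =>
         PySem.List.slice xs (some i) none == PySem.List.slice ys none (some j))))
    = pvHangs xs ys := by
  rw [Bool.eq_iff_iff]
  simp only [pvHangs, List.any_eq_true, PySem.List.mem_pyRange_one, beq_iff_eq]
  constructor
  · rintro ⟨i, ⟨hi1, hi2⟩, j, ⟨hj1, hj2⟩, heq⟩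
    rw [PySem.List.slice_from xs (by omega), PySem.List.slice_to ys (by omega)] at heq
    have hlen := congrArg List.length heq
    simp only [List.length_drop, List.length_take] at hlen
    refine ⟨j, ⟨hj1, by omega⟩, ?_⟩
    rw [PySem.List.slice_from xs (by omega), PySem.List.slice_to ys (by omega)]
    have : ((xs.length : Int) - j).toNat = i.toNat := by omega
    rw [this]; exact heq
  · rintro ⟨k, ⟨hk1, hk2⟩, heq⟩
    rw [PySem.List.slice_from xs (by omega), PySem.List.slice_to ys (by omega)] at heq
    refine ⟨(xs.length : Int) - k, ⟨by omega, by omega⟩, k, ⟨hk1, by omega⟩, ?_⟩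
    rw [PySem.List.slice_from xs (by omega), PySem.List.slice_to ys (by omega)]
    exact heq

-- ===== VERDICT (by name: the statement is the Claim_ definition above) =====
theorem compare_lvls_spec : Claim_equal_compare_lvls := by
  intro lvls1 lvls2 _
  unfold Spec_compare_lvls compare_lvls compare_lvls_alt
  rw [loopA_eq_hangs lvls1 lvls2, loopA_eq_hangs lvls2 lvls1]
  cases pvHangs lvls1 lvls2 <;> cases pvHangs lvls2 lvls1 <;> rfl
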